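-- pv_equiv track=rewrite | github.com/andreafiori/python-coding-dojo | src/python_algorithms/problems/leetcode/ltc_0296_best_meeting_point.py | minDistance1D
-- ===== SOURCE A (Python) =====
-- def minDistance1D(points):
--     """
--     Minimum distance ID
--     :param points:
--     :return:
--     """
--     distance = 0
--     i, j = 0, len(points) - 1
--     while i < j:
--         distance += points[j] - points[i]
--         i += 1
--         j -= 1
--     return distance
-- ===== SOURCE B (Python) =====
-- def minDistance1D(points):
--     """Same result via two bulk slice sums instead of a two-pointer loop."""
--     n = len(points)
--     m = n // 2
--     return sum(points[n - m:]) - sum(points[:m])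
-- ===== Notes on version B (the rewrite author's own statement) =====
-- stated objective: faster
-- what changed: Replaces the inward two-pointer accumulation loop by a closed-form regrouping: the telescoped paired sum equals sum of the last n//2 elements minus sum of the first n//2 elements, computed as two bulk slice sums (C-level sum instead of an interpreted index loop).
import Mathlib
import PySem

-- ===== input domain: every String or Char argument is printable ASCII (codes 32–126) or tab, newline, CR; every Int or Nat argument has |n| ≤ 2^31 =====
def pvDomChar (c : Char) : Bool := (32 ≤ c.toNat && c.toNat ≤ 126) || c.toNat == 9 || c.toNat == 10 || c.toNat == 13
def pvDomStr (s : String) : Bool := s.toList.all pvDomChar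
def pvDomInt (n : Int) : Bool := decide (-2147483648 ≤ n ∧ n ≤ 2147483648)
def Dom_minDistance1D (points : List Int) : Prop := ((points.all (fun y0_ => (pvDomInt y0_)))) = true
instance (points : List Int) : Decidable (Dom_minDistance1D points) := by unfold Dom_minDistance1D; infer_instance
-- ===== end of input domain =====

-- B replaces A's inward two-pointer loop by two bulk slice sums (sum of last n//2 minus sum of first n//2); same O(n) asymptotics, measurably faster by the constant factor of bulk summation over an interpreted index loop.

-- ===== PORT A =====
-- A's while loop; the indices stay in range (0 ≤ i < j ≤ len-1), so pyGetD with default 0 is exact here.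
def minDistLoop (points : List Int) (i j distance : Int) : Int :=
  if i < j then
    minDistLoop points (i + 1) (j - 1)
      (distance + (PySem.List.pyGetD points j 0 - PySem.List.pyGetD points i 0))
  else distance
termination_by (j - i).toNat
decreasing_by omega

def minDistance1D (points : List Int) : Int :=
  minDistLoop points 0 ((points.length : Int) - 1) 0

-- ===== PORT B =====
def minDistance1D_alt (points : List Int) : Int :=
  let n : Int := points.length
  let m : Int := PySem.Int.floordiv n 2
  (PySem.List.slice points (some (n - m)) none).sum
    - (PySem.List.slice points none (some m)).sum

-- ===== PRECONDITION & SPEC =====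
def Spec_minDistance1D (points : List Int) (out : Int) : Prop := out = minDistance1D_alt points
instance (points : List Int) (out : Int) : Decidable (Spec_minDistance1D points out) := by unfold Spec_minDistance1D; infer_instance

-- ===== CLAIM (what is proved, stated in full; the proofs are below) =====
def Claim_equal_minDistance1D : Prop := ∀ (points : List Int), Dom_minDistance1D points → Spec_minDistance1D points (minDistance1D points)

-- ===== LEMMAS AND PROOFS =====

-- A's loop from Nat indices a ≤/> b computes d plus (sum of the m elements ending at index b)
-- minus (sum of the m elements starting at index a), where m = (b+1-a)/2.
lemma minDistLoop_eq (k : Nat) : ∀ (points : List Int) (a b : Nat), b - a ≤ k →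
    b < points.length → ∀ d : Int,
    minDistLoop points (a : Int) (b : Int) d =
      d + (((points.drop (b + 1 - (b + 1 - a) / 2)).take ((b + 1 - a) / 2)).sum
            - ((points.drop a).take ((b + 1 - a) / 2)).sum) := by
  induction k with
  | zero =>
    intro points a b hk hb d
    have hab : ¬ ((a : Int) < (b : Int)) := by exact_mod_cast (by omega : ¬ a < b)
    rw [minDistLoop, if_neg hab]
    have hm : (b + 1 - a) / 2 = 0 := by omega
    simp [hm]
  | succ k ih =>
    intro points a b hk hb d
    by_cases hab : a < b
    · have hab' : (a : Int) < (b : Int) := by exact_mod_cast hab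
      rw [minDistLoop, if_pos hab']
      have ha1 : (a : Int) + 1 = ((a + 1 : Nat) : Int) := by push_cast; ring
      have hb1 : (b : Int) - 1 = ((b - 1 : Nat) : Int) := by omega
      rw [ha1, hb1, ih points (a + 1) (b - 1) (by omega) (by omega)]
      set m' : Nat := (b - 1 + 1 - (a + 1)) / 2 with hm'
      have hmm : (b + 1 - a) / 2 = m' + 1 := by omega
      rw [hmm]
      have hget_b : PySem.List.pyGetD points (b : Int) 0 = points[b] := by
        simp [PySem.List.pyGetD_natCast, List.getD_eq_getElem?_getD, List.getElem?_eq_getElem hb]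
      have hget_a : PySem.List.pyGetD points (a : Int) 0 = points[a]'(by omega) := by
        simp [PySem.List.pyGetD_natCast, List.getD_eq_getElem?_getD,
          List.getElem?_eq_getElem (by omega : a < points.length)]
      rw [hget_b, hget_a]
      -- upper block: take (m'+1) of drop (b - m') ends with points[b]
      have hb0 : b - 1 + 1 - m' = b - m' := by omega
      have hb1' : b + 1 - (m' + 1) = b - m' := by omega
      have hm'b : m' ≤ b := by omega
      have hupper : (points.drop (b - m')).take (m' + 1)
          = (points.drop (b - m')).take m' ++ [points[b]] := by
        rw [List.take_add_one]
        have : (points.drop (b - m'))[m']? = some points[b] := by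
          have hbm : b - m' + m' = b := by omega
          rw [List.getElem?_drop, hbm]
          exact List.getElem?_eq_getElem hb
        simp [this]
      -- lower block: take (m'+1) of drop a starts with points[a]
      have hlower : (points.drop a).take (m' + 1)
          = points[a]'(by omega) :: (points.drop (a + 1)).take m' := by
        rw [List.drop_eq_getElem_cons (by omega : a < points.length)]
        rfl
      rw [hb0, hb1', hupper, hlower]
      simp [List.sum_append]
      ring
    · have hab' : ¬ ((a : Int) < (b : Int)) := by exact_mod_cast hab
      rw [minDistLoop, if_neg hab']
      have hm : (b + 1 - a) / 2 = 0 := by omega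
      simp [hm]

theorem minDistance1D_spec : Claim_equal_minDistance1D := by
  intro points _
  unfold Spec_minDistance1D
  simp only [minDistance1D, minDistance1D_alt]
  rcases Nat.eq_zero_or_pos points.length with h0 | hpos
  · have hnil : points = [] := List.eq_nil_of_length_eq_zero h0
    subst hnil
    rw [minDistLoop]
    norm_num [PySem.List.slice, PySem.Int.floordiv, PySem.List.clampIdx]
  · have hml := minDistLoop_eq points.length points 0 (points.length - 1)
      (by omega) (by omega) 0
    simp only [Nat.cast_zero] at hml
    rw [(by omega : ((points.length : Int)) - 1 = ((points.length - 1 : Nat) : Int)), hml]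
    have hfd : PySem.Int.floordiv ((points.length : Nat) : Int) 2
        = ((points.length / 2 : Nat) : Int) := by
      exact_mod_cast PySem.Int.floordiv_natCast points.length 2
    rw [hfd,
        (by omega : ((points.length : Nat) : Int) - ((points.length / 2 : Nat) : Int)
          = ((points.length - points.length / 2 : Nat) : Int)),
        PySem.List.slice_from_natCast, PySem.List.slice_to_natCast,
        (by omega : (points.length - 1 + 1 - 0) / 2 = points.length / 2),
        (by omega : points.length - 1 + 1 - points.length / 2
          = points.length - points.length / 2)]
    have htake : (points.drop (points.length - points.length / 2)).take (points.length / 2)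
        = points.drop (points.length - points.length / 2) := by
      apply List.take_of_length_le
      rw [List.length_drop]
      omega
    rw [htake, List.drop_zero]
    ring
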